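-- pv_equiv track=rewrite | github.com/Dimitrije-Jimmy/AdventOfCode2024 | day14/main2.py | find_minimal_spread_time
-- ===== SOURCE A (Python) =====
-- def simulate_movements(robots, width, height, seconds):
--     """
--     Simulates the movement of robots over a given number of seconds.
--
--     Args:
--         robots (list of dict): List of robots with positions and velocities.
--         width (int): Width of the grid.
--         height (int): Height of the grid.
--         seconds (int): Number of seconds to simulate.
--
--     Returns:
--         list of dict: Updated list of robots with final positions.
--     """
--     for second in range(seconds):
--         for robot in robots:
--             # Update positions with wrapping
--             robot['x'] = (robot['x'] + robot['vx']) % width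
--             robot['y'] = (robot['y'] + robot['vy']) % height
--     return robots
--
-- def get_bounding_box(robots):
--     """
--     Calculates the bounding box of all robots' positions.
--
--     Args:
--         robots (list of dict): List of robots with positions.
--
--     Returns:
--         tuple: (min_x, max_x, min_y, max_y)
--     """
--     xs = [robot['x'] for robot in robots]
--     ys = [robot['y'] for robot in robots]
--     return min(xs), max(xs), min(ys), max(ys)
--
-- def calculate_area(bounding_box):
--     """
--     Calculates the area of the bounding box.
--
--     Args:
--         bounding_box (tuple): (min_x, max_x, min_y, max_y)
--
--     Returns:
--         int: Area of the bounding box.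
--     """
--     min_x, max_x, min_y, max_y = bounding_box
--     return (max_x - min_x) * (max_y - min_y)
--
-- def find_minimal_spread_time(robots, width, height, max_seconds=20000):
--     """
--     Finds the time when robots are most clustered (minimal bounding box area).
--
--     Args:
--         robots (list of dict): List of robots with initial positions and velocities.
--         width (int): Width of the grid.
--         height (int): Height of the grid.
--         max_seconds (int, optional): Maximum seconds to simulate. Defaults to 20000.
--
--     Returns:
--         tuple: (time, robots_at_min_time)
--     """
--     min_area = float('inf')
--     min_time = 0
--     robots_at_min_time = []
--     consecutive_increases = 0
--     threshold = 100  # Number of consecutive increases to stop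
--
--     for second in range(max_seconds):
--         # Simulate one second
--         simulate_movements(robots, width, height, 1)
--
--         # Calculate current bounding box area
--         bounding_box = get_bounding_box(robots)
--         area = calculate_area(bounding_box)
--
--         # Check if current area is the smallest so far
--         if area < min_area:
--             min_area = area
--             min_time = second + 1  # +1 because we simulated this second
--             # Deep copy robots' positions
--             robots_at_min_time = [{'x': robot['x'], 'y': robot['y']} for robot in robots]
--             consecutive_increases = 0  # Reset counter
--         else:
--             consecutive_increases += 1
--             if consecutive_increases >= threshold:
--                 # Assume that the minimal spread has been passed
--                 break
--
--     return min_time, robots_at_min_time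
-- ===== SOURCE B (Python) =====
-- def find_minimal_spread_time(robots, width, height, max_seconds=20000):
--     # Return-value equivalence only: unlike the original, `robots` is not mutated.
--     if max_seconds < 1:
--         return 0, []
--     state = [(r['x'], r['y'], r['vx'], r['vy']) for r in robots]
--
--     def positions(t):
--         return [((x + t * vx) % width, (y + t * vy) % height)
--                 for (x, y, vx, vy) in state]
--
--     def area(t):
--         ps = positions(t)
--         xs = [p[0] for p in ps]
--         ys = [p[1] for p in ps]
--         return (max(xs) - min(xs)) * (max(ys) - min(ys))
--
--     # Phase 1: find only the argmin time; no snapshots, no counter.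
--     best_t, best_a = 1, area(1)
--     t = 1
--     while t < max_seconds and t - best_t < 100:
--         t += 1
--         a = area(t)
--         if a < best_a:
--             best_t, best_a = t, a
--     # Phase 2: reconstruct the positions once, at the winning time.
--     return best_t, [{'x': x, 'y': y} for (x, y) in positions(best_t)]
-- ===== Notes on version B (the rewrite author's own statement) =====
-- stated objective: alternative
-- what changed: B is two-phase: a search loop that tracks only the best time and best area (positions derived per second by the closed form (x0+t*vx)%width, the consecutive-increase counter replaced by the while-guard t - best_t < 100, and no snapshot maintained), followed by a single reconstruction of the robots' positions at the winning time; A's in-place mutation of robots is not reproduced (return value is identical).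
import Mathlib
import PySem

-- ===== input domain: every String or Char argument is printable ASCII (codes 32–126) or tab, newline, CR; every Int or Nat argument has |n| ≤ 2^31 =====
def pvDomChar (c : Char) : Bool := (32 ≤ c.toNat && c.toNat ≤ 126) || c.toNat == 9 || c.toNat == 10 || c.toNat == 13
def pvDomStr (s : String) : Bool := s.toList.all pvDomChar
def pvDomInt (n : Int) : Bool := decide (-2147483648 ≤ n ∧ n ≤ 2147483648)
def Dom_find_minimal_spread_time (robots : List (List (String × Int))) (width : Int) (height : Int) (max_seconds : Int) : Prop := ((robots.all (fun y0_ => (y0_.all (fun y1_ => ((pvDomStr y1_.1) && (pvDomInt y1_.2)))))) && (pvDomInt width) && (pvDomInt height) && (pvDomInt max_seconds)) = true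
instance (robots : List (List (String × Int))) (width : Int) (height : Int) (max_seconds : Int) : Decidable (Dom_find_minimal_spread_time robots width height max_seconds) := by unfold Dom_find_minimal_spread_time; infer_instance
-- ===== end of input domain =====

-- B is two-phase: a search loop tracking only the best time/area (closed-form
-- positions, while-guard instead of the counter, no snapshot), then one final
-- reconstruction of the positions at the winning time (objective: alternative).
-- Python A mutates `robots` in place (B does not); the equivalence proved here is
-- about the RETURN value only.

-- ===== PORT A =====
-- missing keys (KeyError in Python) are read as 0 here; excluded by Pre_
def pvA_step (width height : Int) (robot : PySem.Dict String Int) : PySem.Dict String Int :=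
  let robot := robot.insert "x" (PySem.Int.mod ((robot.get? "x").getD 0 + (robot.get? "vx").getD 0) width)
  let robot := robot.insert "y" (PySem.Int.mod ((robot.get? "y").getD 0 + (robot.get? "vy").getD 0) height)
  robot

def simulate_movements (robots : List (PySem.Dict String Int)) (width height seconds : Int) :
    List (PySem.Dict String Int) :=
  (PySem.List.pyRange 0 seconds 1).foldl (fun rs _ => rs.map (pvA_step width height)) robots

def get_bounding_box (robots : List (PySem.Dict String Int)) : Int × Int × Int × Int :=
  let xs := robots.map (fun r => (r.get? "x").getD 0)
  let ys := robots.map (fun r => (r.get? "y").getD 0)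
  ((PySem.List.min? xs (fun v => v)).getD 0, (PySem.List.max? xs (fun v => v)).getD 0,
   (PySem.List.min? ys (fun v => v)).getD 0, (PySem.List.max? ys (fun v => v)).getD 0)

def calculate_area (bb : Int × Int × Int × Int) : Int :=
  (bb.2.1 - bb.1) * (bb.2.2.2 - bb.2.2.1)

def pvA_loop (width height : Int) (fuel : Nat) (second : Int)
    (robots : List (PySem.Dict String Int)) (minArea : Option Int) (minTime : Int)
    (best : List (List (String × Int))) (cnt : Int) : Int × (List (List (String × Int))) :=
  match fuel with
  | 0 => (minTime, best)
  | Nat.succ fuel =>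
    let robots := simulate_movements robots width height 1
    let area := calculate_area (get_bounding_box robots)
    -- min_area starts as float('inf'): represented by `none`
    let better : Bool := match minArea with | none => true | some m => decide (area < m)
    if better then
      pvA_loop width height fuel (second + 1) robots (some area) (second + 1)
        (robots.map (fun r => [("x", (r.get? "x").getD 0), ("y", (r.get? "y").getD 0)])) 0
    else
      let cnt := cnt + 1
      if cnt ≥ 100 then (minTime, best)
      else pvA_loop width height fuel (second + 1) robots minArea minTime best cnt

def find_minimal_spread_time (robots : List (List (String × Int))) (width : Int) (height : Int) (max_seconds : Int) : Int × (List (List (String × Int))) :=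
  pvA_loop width height max_seconds.toNat 0 (robots.map PySem.Dict.mk) none 0 [] 0

-- ===== PORT B =====
def pvB_quad (r : List (String × Int)) : Int × Int × Int × Int :=
  (((PySem.Dict.mk r).get? "x").getD 0, ((PySem.Dict.mk r).get? "y").getD 0,
   ((PySem.Dict.mk r).get? "vx").getD 0, ((PySem.Dict.mk r).get? "vy").getD 0)

def pvB_positions (width height : Int) (qs : List (Int × Int × Int × Int)) (t : Int) : List (Int × Int) :=
  qs.map (fun q => (PySem.Int.mod (q.1 + t * q.2.2.1) width, PySem.Int.mod (q.2.1 + t * q.2.2.2) height))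

def pvB_area (width height : Int) (qs : List (Int × Int × Int × Int)) (t : Int) : Int :=
  let ps := pvB_positions width height qs t
  let xs := ps.map Prod.fst
  let ys := ps.map Prod.snd
  ((PySem.List.max? xs (fun v => v)).getD 0 - (PySem.List.min? xs (fun v => v)).getD 0) *
  ((PySem.List.max? ys (fun v => v)).getD 0 - (PySem.List.min? ys (fun v => v)).getD 0)

-- the while loop: fuel counts the remaining iterations allowed by `t < max_seconds`
def pvB_search (width height : Int) (qs : List (Int × Int × Int × Int)) (fuel : Nat)
    (t bestT bestA : Int) : Int :=
  match fuel with
  | 0 => bestT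
  | Nat.succ fuel =>
    if t - bestT < 100 then
      let a := pvB_area width height qs (t + 1)
      if a < bestA then pvB_search width height qs fuel (t + 1) (t + 1) a
      else pvB_search width height qs fuel (t + 1) bestT bestA
    else bestT

def find_minimal_spread_time_alt (robots : List (List (String × Int))) (width : Int) (height : Int) (max_seconds : Int) : Int × (List (List (String × Int))) :=
  if max_seconds < 1 then (0, [])
  else
    let qs := robots.map pvB_quad
    let bestT := pvB_search width height qs (max_seconds - 1).toNat 1 1 (pvB_area width height qs 1)
    (bestT, (pvB_positions width height qs bestT).map (fun p => [("x", p.1), ("y", p.2)]))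

-- ===== PRECONDITION & SPEC =====
-- Pre_ excludes exactly the inputs where Python A raises (possible only when the
-- loop runs, i.e. max_seconds ≥ 1): an empty robot list (ValueError from min([])),
-- a zero width/height (ZeroDivisionError from %), and a robot dict missing one of
-- the keys 'x','y','vx','vy' (KeyError).
def Pre_find_minimal_spread_time (robots : List (List (String × Int))) (width : Int) (height : Int) (max_seconds : Int) : Prop :=
  max_seconds ≤ 0 ∨ (robots ≠ [] ∧ width ≠ 0 ∧ height ≠ 0 ∧
  ∀ r ∈ robots, ((PySem.Dict.mk r).get? "x").isSome ∧ ((PySem.Dict.mk r).get? "y").isSome ∧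
    ((PySem.Dict.mk r).get? "vx").isSome ∧ ((PySem.Dict.mk r).get? "vy").isSome)
instance (robots : List (List (String × Int))) (width : Int) (height : Int) (max_seconds : Int) : Decidable (Pre_find_minimal_spread_time robots width height max_seconds) := by unfold Pre_find_minimal_spread_time; infer_instance

def pvWitness_find_minimal_spread_time : (List (List (String × Int))) × Int × Int × Int :=
  ([[("x", 2), ("y", 3), ("vx", 1), ("vy", -1)]], 5, 7, 10)

def Spec_find_minimal_spread_time (robots : List (List (String × Int))) (width : Int) (height : Int) (max_seconds : Int) (out : Int × (List (List (String × Int)))) : Prop := out = find_minimal_spread_time_alt robots width height max_seconds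
instance (robots : List (List (String × Int))) (width : Int) (height : Int) (max_seconds : Int) (out : Int × (List (List (String × Int)))) : Decidable (Spec_find_minimal_spread_time robots width height max_seconds out) := by unfold Spec_find_minimal_spread_time; infer_instance

-- ===== CLAIM (what is proved, stated in full; the proofs are below) =====
def Claim_equal_find_minimal_spread_time : Prop := ∀ (robots : List (List (String × Int))) (width : Int) (height : Int) (max_seconds : Int), Dom_find_minimal_spread_time robots width height max_seconds → Pre_find_minimal_spread_time robots width height max_seconds → Spec_find_minimal_spread_time robots width height max_seconds (find_minimal_spread_time robots width height max_seconds)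

-- ===== LEMMAS AND PROOFS =====

def pvTup (r : PySem.Dict String Int) : Int × Int × Int × Int :=
  ((r.get? "x").getD 0, (r.get? "y").getD 0, (r.get? "vx").getD 0, (r.get? "vy").getD 0)

def pvSnap (width height : Int) (qs : List (Int × Int × Int × Int)) (t : Int) :
    List (List (String × Int)) :=
  (pvB_positions width height qs t).map (fun p => [("x", p.1), ("y", p.2)])

lemma pv_mod_add (a c w : Int) :
    PySem.Int.mod (PySem.Int.mod a w + c) w = PySem.Int.mod (a + c) w := by
  simp [PySem.Int.mod]

lemma pv_mod_idem (a w : Int) :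
    PySem.Int.mod (PySem.Int.mod a w) w = PySem.Int.mod a w := by
  simpa using pv_mod_add a 0 w

lemma pv_sim_one (robots : List (PySem.Dict String Int)) (width height : Int) :
    simulate_movements robots width height 1 = robots.map (pvA_step width height) := by
  have h : PySem.List.pyRange 0 1 1 = [0] := by decide
  simp [simulate_movements, h]

lemma pv_step_tuple (width height : Int) (r : PySem.Dict String Int) :
    pvTup (pvA_step width height r)
    = (PySem.Int.mod ((pvTup r).1 + (pvTup r).2.2.1) width,
       PySem.Int.mod ((pvTup r).2.1 + (pvTup r).2.2.2) height,
       (pvTup r).2.2.1, (pvTup r).2.2.2) := by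
  simp [pvTup, pvA_step, PySem.Dict.get?_insert_self, PySem.Dict.get?_insert_of_ne]

-- one simulated second moves the tuple view to the closed form at t+1
-- (px/py generalize the current positions: the initial list is not mod-normalized)
lemma pv_step_list (width height : Int) (qs : List (Int × Int × Int × Int))
    (robots : List (PySem.Dict String Int)) (t : Int)
    (px py : Int × Int × Int × Int → Int)
    (hpos : robots.map pvTup = qs.map (fun q => (px q, py q, q.2.2.1, q.2.2.2)))
    (hx : ∀ q, PySem.Int.mod (px q) width = PySem.Int.mod (q.1 + t * q.2.2.1) width)
    (hy : ∀ q, PySem.Int.mod (py q) height = PySem.Int.mod (q.2.1 + t * q.2.2.2) height) :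
    (simulate_movements robots width height 1).map pvTup
      = qs.map (fun q => (PySem.Int.mod (q.1 + (t + 1) * q.2.2.1) width,
          PySem.Int.mod (q.2.1 + (t + 1) * q.2.2.2) height, q.2.2.1, q.2.2.2)) := by
  rw [pv_sim_one, List.map_map]
  have h1 : pvTup ∘ pvA_step width height
      = (fun u : Int × Int × Int × Int =>
          (PySem.Int.mod (u.1 + u.2.2.1) width, PySem.Int.mod (u.2.1 + u.2.2.2) height,
           u.2.2.1, u.2.2.2)) ∘ pvTup := by
    funext r
    simpa [Function.comp] using pv_step_tuple width height r
  rw [h1, ← List.map_map, hpos, List.map_map]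
  apply List.map_congr_left
  intro q _
  simp only [Function.comp]
  refine Prod.ext ?_ (Prod.ext ?_ rfl)
  · show PySem.Int.mod (px q + q.2.2.1) width = _
    rw [← pv_mod_add (px q), hx q, pv_mod_add]; congr 1; ring
  · show PySem.Int.mod (py q + q.2.2.2) height = _
    rw [← pv_mod_add (py q), hy q, pv_mod_add]; congr 1; ring

lemma pv_area_eq (width height : Int) (qs : List (Int × Int × Int × Int))
    (robots : List (PySem.Dict String Int)) (t : Int)
    (hpos : robots.map pvTup = qs.map (fun q =>
      (PySem.Int.mod (q.1 + t * q.2.2.1) width, PySem.Int.mod (q.2.1 + t * q.2.2.2) height,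
       q.2.2.1, q.2.2.2))) :
    calculate_area (get_bounding_box robots) = pvB_area width height qs t := by
  have hxs : robots.map (fun r => (r.get? "x").getD 0)
      = (pvB_positions width height qs t).map Prod.fst := by
    have := congrArg (List.map (fun u : Int × Int × Int × Int => u.1)) hpos
    simpa [List.map_map, Function.comp, pvTup, pvB_positions] using this
  have hys : robots.map (fun r => (r.get? "y").getD 0)
      = (pvB_positions width height qs t).map Prod.snd := by
    have := congrArg (List.map (fun u : Int × Int × Int × Int => u.2.1)) hpos
    simpa [List.map_map, Function.comp, pvTup, pvB_positions] using this
  simp only [calculate_area, get_bounding_box, pvB_area, hxs, hys]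

lemma pv_snap_eq (width height : Int) (qs : List (Int × Int × Int × Int))
    (robots : List (PySem.Dict String Int)) (t : Int)
    (hpos : robots.map pvTup = qs.map (fun q =>
      (PySem.Int.mod (q.1 + t * q.2.2.1) width, PySem.Int.mod (q.2.1 + t * q.2.2.2) height,
       q.2.2.1, q.2.2.2))) :
    robots.map (fun r => [("x", (r.get? "x").getD 0), ("y", (r.get? "y").getD 0)])
      = pvSnap width height qs t := by
  have := congrArg (List.map (fun u : Int × Int × Int × Int =>
    [("x", u.1), ("y", u.2.1)])) hpos
  simpa [List.map_map, Function.comp, pvTup, pvSnap, pvB_positions] using this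

lemma pv_search_stop (width height : Int) (qs : List (Int × Int × Int × Int)) (fuel : Nat)
    (t bestT bestA : Int) (h : ¬ t - bestT < 100) :
    pvB_search width height qs fuel t bestT bestA = bestT := by
  cases fuel with
  | zero => rfl
  | succ fuel => simp [pvB_search, h]

lemma pv_loop_eq (width height : Int) (qs : List (Int × Int × Int × Int)) :
    ∀ (fuel : Nat) (second : Int) (robots : List (PySem.Dict String Int))
      (bestA minTime cnt : Int),
      robots.map pvTup = qs.map (fun q =>
        (PySem.Int.mod (q.1 + second * q.2.2.1) width,
         PySem.Int.mod (q.2.1 + second * q.2.2.2) height, q.2.2.1, q.2.2.2)) →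
      cnt = second - minTime →
      cnt < 100 →
      pvA_loop width height fuel second robots (some bestA) minTime
        (pvSnap width height qs minTime) cnt
        = (pvB_search width height qs fuel second minTime bestA,
           pvSnap width height qs (pvB_search width height qs fuel second minTime bestA)) := by
  intro fuel
  induction fuel with
  | zero => intros; rfl
  | succ fuel ih =>
    intro second robots bestA minTime cnt hpos hcnt hlt
    have hstep := pv_step_list width height qs robots second _ _ hpos
      (fun q => pv_mod_idem _ _) (fun q => pv_mod_idem _ _)
    set robots' := simulate_movements robots width height 1 with hrob
    have hguard : second - minTime < 100 := by omega
    show pvA_loop width height (fuel + 1) second robots (some bestA) minTime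
        (pvSnap width height qs minTime) cnt = _
    simp only [pvA_loop, pvB_search, ← hrob, if_pos hguard,
      pv_area_eq width height qs robots' (second + 1) hstep]
    by_cases hbetter : pvB_area width height qs (second + 1) < bestA
    · simp only [hbetter, decide_true, if_true]
      rw [pv_snap_eq width height qs robots' (second + 1) hstep]
      exact ih (second + 1) robots' _ _ _ hstep (by omega) (by omega)
    · simp only [hbetter, decide_false, Bool.false_eq_true, if_false]
      by_cases hbreak : cnt + 1 ≥ 100
      · rw [if_pos hbreak, pv_search_stop width height qs fuel (second + 1) minTime bestA (by omega)]
      · rw [if_neg hbreak]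
        exact ih (second + 1) robots' _ _ _ hstep (by omega) (by omega)

-- ===== VERDICT (by name: the statement is the Claim_ definition above) =====
theorem find_minimal_spread_time_spec : Claim_equal_find_minimal_spread_time := by
  intro robots width height max_seconds _hdom _hpre
  unfold Spec_find_minimal_spread_time find_minimal_spread_time find_minimal_spread_time_alt
  by_cases hms : max_seconds < 1
  · have h0 : max_seconds.toNat = 0 := by omega
    simp [hms, h0, pvA_loop]
  · rw [if_neg hms]
    have hfuel : max_seconds.toNat = Nat.succ (max_seconds - 1).toNat := by omega
    rw [hfuel]
    have hpos0 : (robots.map PySem.Dict.mk).map pvTup = robots.map pvB_quad := by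
      simp [List.map_map, Function.comp, pvTup, pvB_quad]
    have hstep1 : (simulate_movements (robots.map PySem.Dict.mk) width height 1).map pvTup
        = (robots.map pvB_quad).map (fun q =>
            (PySem.Int.mod (q.1 + (1 : Int) * q.2.2.1) width,
             PySem.Int.mod (q.2.1 + (1 : Int) * q.2.2.2) height, q.2.2.1, q.2.2.2)) := by
      have := pv_step_list width height (robots.map pvB_quad) (robots.map PySem.Dict.mk) 0
        (fun q => q.1) (fun q => q.2.1)
        (by rw [hpos0]; exact (List.map_id' _).symm ▸ List.map_congr_left (fun q _ => rfl))
        (fun q => by congr 1; ring) (fun q => by congr 1; ring)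
      simpa using this
    set robots1 := simulate_movements (robots.map PySem.Dict.mk) width height 1 with hrob1
    show pvA_loop width height ((max_seconds - 1).toNat + 1) 0 (robots.map PySem.Dict.mk)
        none 0 [] 0 = _
    simp only [pvA_loop, ← hrob1]
    rw [pv_area_eq width height (robots.map pvB_quad) robots1 1 hstep1,
        pv_snap_eq width height (robots.map pvB_quad) robots1 1 hstep1]
    have h := pv_loop_eq width height (robots.map pvB_quad) (max_seconds - 1).toNat 1 robots1
      (pvB_area width height (robots.map pvB_quad) 1) 1 0 hstep1 (by omega) (by omega)
    simp only [zero_add] at h ⊢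
    rw [h]
    rfl
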